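-- pv_equiv track=rewrite | github.com/ankush850/real-time-speech-translator- | server.py | parse_translation
-- ===== SOURCE A (Python) =====
-- from typing import Tuple, Dict
--
-- def parse_translation(raw_text: str) -> Tuple[str, str]:
--     """
--     Parse Gemini output to extract Hindi and Spanish translations.
--     Returns (hindi, spanish). Empty strings if parsing fails.
--     """
--     hindi = ""
--     spanish = ""
--
--     for line in raw_text.splitlines():
--         line = line.strip()
--         if line.lower().startswith("hindi"):
--             hindi = line.split(":", 1)[1].strip() if ":" in line else ""
--         elif line.lower().startswith("spanish"):
--             spanish = line.split(":", 1)[1].strip() if ":" in line else ""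
--
--     return hindi, spanish
-- ===== SOURCE B (Python) =====
-- def parse_translation(raw_text):
--     """Two independent scans: value after ':' of the LAST line whose lowercased
--     stripped form starts with the keyword ('' if no colon or no match)."""
--     def extract(keyword):
--         value = ""
--         for line in raw_text.splitlines():
--             line = line.strip()
--             if line.lower().startswith(keyword):
--                 value = line.split(":", 1)[1].strip() if ":" in line else ""
--         return value
--     return extract("hindi"), extract("spanish")
-- ===== Notes on version B (the rewrite author's own statement) =====
-- stated objective: alternative
-- what changed: Replaces the single pass that threads a (hindi, spanish) pair through an if/elif chain with a keyword-parameterised helper run as two independent last-match scans, one per language.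
import Mathlib
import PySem

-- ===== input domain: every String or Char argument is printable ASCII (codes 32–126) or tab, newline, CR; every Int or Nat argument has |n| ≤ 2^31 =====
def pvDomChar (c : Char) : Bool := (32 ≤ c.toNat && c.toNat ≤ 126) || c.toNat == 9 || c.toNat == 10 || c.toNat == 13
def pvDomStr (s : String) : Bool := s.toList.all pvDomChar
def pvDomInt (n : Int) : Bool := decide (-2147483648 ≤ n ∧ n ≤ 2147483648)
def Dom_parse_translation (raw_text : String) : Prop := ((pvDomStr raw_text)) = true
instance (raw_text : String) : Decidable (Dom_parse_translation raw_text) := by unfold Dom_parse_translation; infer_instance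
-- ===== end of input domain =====

-- ===== PORT A =====
-- single pass threading the (hindi, spanish) pair through the if/elif chain
def parse_translation (raw_text : String) : String × String :=
  (PySem.Str.splitlines raw_text).foldl
    (fun p line =>
      let l := PySem.Str.strip line
      if PySem.Str.startswith (PySem.Str.lower l) "hindi" then
        ((if PySem.Str.isIn ":" l then
            PySem.Str.strip (((PySem.Str.splitMax? l ":" 1).getD []).getD 1 "")
          else ""), p.2)
      else if PySem.Str.startswith (PySem.Str.lower l) "spanish" then
        (p.1,
         (if PySem.Str.isIn ":" l then
            PySem.Str.strip (((PySem.Str.splitMax? l ":" 1).getD []).getD 1 "")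
          else ""))
      else p)
    ("", "")

-- ===== PORT B =====
-- B: keyword-parameterised last-match scan, run once per language
def pvExtract (raw_text : String) (keyword : String) : String :=
  (PySem.Str.splitlines raw_text).foldl
    (fun value line =>
      let l := PySem.Str.strip line
      if PySem.Str.startswith (PySem.Str.lower l) keyword then
        (if PySem.Str.isIn ":" l then
           PySem.Str.strip (((PySem.Str.splitMax? l ":" 1).getD []).getD 1 "")
         else "")
      else value)
    ""

def parse_translation_alt (raw_text : String) : String × String :=
  (pvExtract raw_text "hindi", pvExtract raw_text "spanish")

-- ===== PRECONDITION & SPEC =====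
def Spec_parse_translation (raw_text : String) (out : String × String) : Prop := out = parse_translation_alt raw_text
instance (raw_text : String) (out : String × String) : Decidable (Spec_parse_translation raw_text out) := by unfold Spec_parse_translation; infer_instance

-- ===== CLAIM (what is proved, stated in full; the proofs are below) =====
def Claim_equal_parse_translation : Prop := ∀ (raw_text : String), Dom_parse_translation raw_text → Spec_parse_translation raw_text (parse_translation raw_text)

-- ===== LEMMAS AND PROOFS =====

-- a line cannot start with both "hindi" and "spanish"
theorem hindi_not_spanish (t : String) (h : PySem.Str.startswith t "hindi" = true) :
    PySem.Str.startswith t "spanish" = false := by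
  simp only [PySem.Str.startswith_eq] at h ⊢
  rw [PySem.Chars.startswith_iff] at h
  by_contra hc
  rw [Bool.not_eq_false, PySem.Chars.startswith_iff] at hc
  rcases h with ⟨r1, e1⟩
  rcases hc with ⟨r2, e2⟩
  rw [← e1] at e2
  simp at e2

-- the fused pair-state fold of A splits into B's two independent scans
theorem foldl_split (lines : List String) (h s : String) :
    lines.foldl
      (fun p line =>
        let l := PySem.Str.strip line
        if PySem.Str.startswith (PySem.Str.lower l) "hindi" then
          ((if PySem.Str.isIn ":" l then
              PySem.Str.strip (((PySem.Str.splitMax? l ":" 1).getD []).getD 1 "")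
            else ""), p.2)
        else if PySem.Str.startswith (PySem.Str.lower l) "spanish" then
          (p.1,
           (if PySem.Str.isIn ":" l then
              PySem.Str.strip (((PySem.Str.splitMax? l ":" 1).getD []).getD 1 "")
            else ""))
        else p)
      (h, s)
    =
    (lines.foldl
      (fun value line =>
        let l := PySem.Str.strip line
        if PySem.Str.startswith (PySem.Str.lower l) "hindi" then
          (if PySem.Str.isIn ":" l then
             PySem.Str.strip (((PySem.Str.splitMax? l ":" 1).getD []).getD 1 "")
           else "")
        else value) h,
     lines.foldl
      (fun value line =>
        let l := PySem.Str.strip line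
        if PySem.Str.startswith (PySem.Str.lower l) "spanish" then
          (if PySem.Str.isIn ":" l then
             PySem.Str.strip (((PySem.Str.splitMax? l ":" 1).getD []).getD 1 "")
           else "")
        else value) s) := by
  induction lines generalizing h s with
  | nil => rfl
  | cons line rest ih =>
    simp only [List.foldl_cons]
    by_cases hh : PySem.Str.startswith (PySem.Str.lower (PySem.Str.strip line)) "hindi" = true
    · have hs := hindi_not_spanish _ hh
      simp only [hh, hs, if_true, if_false, Bool.false_eq_true]
      exact ih _ _
    · by_cases hs : PySem.Str.startswith (PySem.Str.lower (PySem.Str.strip line)) "spanish" = true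
      · simp only [hh, hs, if_true]
        exact ih _ _
      · simp only [hh, hs]
        exact ih _ _

-- ===== VERDICT (by name: the statement is the Claim_ definition above) =====
theorem parse_translation_spec : Claim_equal_parse_translation := by
  intro raw_text _
  unfold Spec_parse_translation parse_translation parse_translation_alt pvExtract
  exact foldl_split (PySem.Str.splitlines raw_text) "" ""
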